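-- pv_equiv track=rewrite | github.com/cnxw4570123/Problem-Solving | 프로그래머스/3/87391. 공 이동 시뮬레이션/공 이동 시뮬레이션.py | solution
-- ===== SOURCE A (Python) =====
-- def solution(n, m, x, y, queries):
--     y1, y2, x1, x2 = x, x, y, y # y최소, y최대, x최소, x최대
--     for dir, dist in queries[::-1]:
--         if check(y1, y2, x1, x2, n, m):
--             return 0
--
--         # 오른쪽으로 이동
--         if dir == 0:
--             x2 = min(x2 + dist, m - 1)
--             if x1 != 0:
--                 x1 += dist
--             continue
--
--         # 왼쪽으로 이동
--         if dir == 1: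
--             x1 = max(0, x1 - dist)
--             if x2 != m - 1:
--                 x2 -= dist
--             continue
--
--         # 아래쪽으로 이동
--         if dir == 2:
--             y2 = min(y2 + dist, n - 1)
--             if y1 != 0:
--                 y1 += dist
--             continue
--
--         y1 = max(0, y1 - dist)
--         if y2 != n - 1:
--             y2 -= dist
--
--     else:
--         if check(y1, y2, x1, x2, n, m):
--             return 0
--
--     return (y2 - y1 + 1) * (x2 - x1 + 1)
--
-- def check(y1, y2, x1, x2, n, m):
--     return y1 >= n or x1 >= m or y2 < 0 or x2 < 0
-- ===== SOURCE B (Python) =====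
-- def _axis(lo, hi, limit, moves):
--     # Reverse-pass over one axis: moves is a list of (grow, dist) in reverse
--     # query order; returns final (lo, hi) and whether the interval was ever
--     # off-board (lo >= limit or hi < 0) at any point, including initially.
--     off = lo >= limit or hi < 0
--     for grow, dist in moves:
--         if grow:
--             hi = min(hi + dist, limit - 1)
--             if lo != 0:
--                 lo += dist
--         else:
--             lo = max(0, lo - dist)
--             if hi != limit - 1:
--                 hi -= dist
--         off = off or lo >= limit or hi < 0
--     return lo, hi, off
--
--
-- def solution(n, m, x, y, queries):
--     rev = list(reversed(queries))
--     c1, c2, coff = _axis(y, y, m, [(d == 0, t) for d, t in rev if d in (0, 1)])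
--     r1, r2, roff = _axis(x, x, n, [(d == 2, t) for d, t in rev if d not in (0, 1)])
--     if coff or roff:
--         return 0
--     return (r2 - r1 + 1) * (c2 - c1 + 1)
-- ===== Notes on version B (the rewrite author's own statement) =====
-- stated objective: alternative
-- what changed: Replaces the single coupled reverse loop with early returns by two independent filtered passes (one per axis) that accumulate an ever-off-board flag, exploiting that horizontal and vertical moves never interact.
import Mathlib
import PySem

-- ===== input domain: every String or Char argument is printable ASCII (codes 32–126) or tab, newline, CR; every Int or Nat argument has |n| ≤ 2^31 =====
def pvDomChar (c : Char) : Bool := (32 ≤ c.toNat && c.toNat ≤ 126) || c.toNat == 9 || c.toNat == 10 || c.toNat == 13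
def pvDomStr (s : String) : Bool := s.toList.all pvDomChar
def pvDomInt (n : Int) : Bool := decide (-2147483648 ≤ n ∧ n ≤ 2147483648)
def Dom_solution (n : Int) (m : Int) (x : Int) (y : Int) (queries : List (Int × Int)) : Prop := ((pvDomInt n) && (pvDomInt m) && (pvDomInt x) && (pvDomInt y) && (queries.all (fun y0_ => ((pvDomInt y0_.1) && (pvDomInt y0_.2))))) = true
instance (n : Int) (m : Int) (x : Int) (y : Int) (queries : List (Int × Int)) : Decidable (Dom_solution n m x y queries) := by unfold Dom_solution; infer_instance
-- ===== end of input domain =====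

-- B replaces A's single coupled reverse loop (early return 0) by two
-- independent filtered per-axis passes that accumulate an "ever off-board"
-- flag; objective: alternative decomposition, same cost.

-- ===== PORT A =====
-- helper check(y1, y2, x1, x2, n, m)
def pvCheck (y1 y2 x1 x2 n m : Int) : Bool :=
  decide (y1 ≥ n) || decide (x1 ≥ m) || decide (y2 < 0) || decide (x2 < 0)

-- the for-loop over queries[::-1] with its early 'return 0'; the for-else
-- check and the final area expression are the [] case
def pvLoopA (n m : Int) : List (Int × Int) → Int → Int → Int → Int → Int
  | [], y1, y2, x1, x2 =>
    if pvCheck y1 y2 x1 x2 n m then 0 else (y2 - y1 + 1) * (x2 - x1 + 1)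
  | (dir, dist) :: rest, y1, y2, x1, x2 =>
    if pvCheck y1 y2 x1 x2 n m then 0
    else if dir = 0 then
      pvLoopA n m rest y1 y2 (if x1 ≠ 0 then x1 + dist else x1) (min (x2 + dist) (m - 1))
    else if dir = 1 then
      pvLoopA n m rest y1 y2 (max 0 (x1 - dist)) (if x2 ≠ m - 1 then x2 - dist else x2)
    else if dir = 2 then
      pvLoopA n m rest (if y1 ≠ 0 then y1 + dist else y1) (min (y2 + dist) (n - 1)) x1 x2
    else
      pvLoopA n m rest (max 0 (y1 - dist)) (if y2 ≠ n - 1 then y2 - dist else y2) x1 x2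

def solution (n : Int) (m : Int) (x : Int) (y : Int) (queries : List (Int × Int)) : Int :=
  -- queries[::-1] = queries.reverse (PySem.List.slice?_none_none_neg_one)
  pvLoopA n m queries.reverse x x y y

-- ===== PORT B =====
-- one loop iteration of _axis: state is (lo, hi, off)
def pvAxisStep (limit : Int) (s : Int × Int × Bool) (mv : Bool × Int) : Int × Int × Bool :=
  let lo' := if mv.1 then (if s.1 ≠ 0 then s.1 + mv.2 else s.1) else max 0 (s.1 - mv.2)
  let hi' := if mv.1 then min (s.2.1 + mv.2) (limit - 1)
             else (if s.2.1 ≠ limit - 1 then s.2.1 - mv.2 else s.2.1)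
  (lo', hi', s.2.2 || decide (lo' ≥ limit) || decide (hi' < 0))

-- _axis(lo, hi, limit, moves)
def pvAxis (lo hi limit : Int) (moves : List (Bool × Int)) : Int × Int × Bool :=
  moves.foldl (pvAxisStep limit) (lo, hi, decide (lo ≥ limit) || decide (hi < 0))

-- the two filtered/mapped move lists built from rev = list(reversed(queries))
def pvHMoves (rev : List (Int × Int)) : List (Bool × Int) :=
  (rev.filter (fun q => q.1 == 0 || q.1 == 1)).map (fun q => ((q.1 == 0 : Bool), q.2))

def pvVMoves (rev : List (Int × Int)) : List (Bool × Int) :=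
  (rev.filter (fun q => !(q.1 == 0 || q.1 == 1))).map (fun q => ((q.1 == 2 : Bool), q.2))

def solution_alt (n : Int) (m : Int) (x : Int) (y : Int) (queries : List (Int × Int)) : Int :=
  let rev := queries.reverse
  let c := pvAxis y y m (pvHMoves rev)
  let r := pvAxis x x n (pvVMoves rev)
  if c.2.2 || r.2.2 then 0 else (r.2.1 - r.1 + 1) * (c.2.1 - c.1 + 1)

-- ===== PRECONDITION & SPEC =====
def Spec_solution (n : Int) (m : Int) (x : Int) (y : Int) (queries : List (Int × Int)) (out : Int) : Prop := out = solution_alt n m x y queries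
instance (n : Int) (m : Int) (x : Int) (y : Int) (queries : List (Int × Int)) (out : Int) : Decidable (Spec_solution n m x y queries out) := by unfold Spec_solution; infer_instance

-- ===== CLAIM (what is proved, stated in full; the proofs are below) =====
def Claim_equal_solution : Prop := ∀ (n : Int) (m : Int) (x : Int) (y : Int) (queries : List (Int × Int)), Dom_solution n m x y queries → Spec_solution n m x y queries (solution n m x y queries)

-- ===== LEMMAS AND PROOFS =====

-- the lo/hi components of the fold ignore the seed flag, and the flag is
-- the seed flag OR-ed with the flag obtained from a false seed
lemma pvAxis_foldl_off (limit : Int) (ms : List (Bool × Int)) :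
    ∀ (lo hi : Int) (b : Bool),
      ms.foldl (pvAxisStep limit) (lo, hi, b) =
        ((ms.foldl (pvAxisStep limit) (lo, hi, false)).1,
         (ms.foldl (pvAxisStep limit) (lo, hi, false)).2.1,
         b || (ms.foldl (pvAxisStep limit) (lo, hi, false)).2.2) := by
  induction ms with
  | nil => intro lo hi b; simp
  | cons mv rest ih =>
    intro lo hi b
    simp only [List.foldl_cons]
    rw [show pvAxisStep limit (lo, hi, b) mv =
        ((pvAxisStep limit (lo, hi, false) mv).1,
         (pvAxisStep limit (lo, hi, false) mv).2.1,
         b || (pvAxisStep limit (lo, hi, false) mv).2.2) from by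
      simp [pvAxisStep, Bool.or_assoc]]
    rw [ih, ih ((pvAxisStep limit (lo, hi, false) mv).1)
          ((pvAxisStep limit (lo, hi, false) mv).2.1)
          ((pvAxisStep limit (lo, hi, false) mv).2.2)]
    simp [Bool.or_assoc]

-- a true seed flag stays true
lemma pvAxis_seed_true (limit lo hi : Int) (ms : List (Bool × Int)) :
    (ms.foldl (pvAxisStep limit) (lo, hi, true)).2.2 = true := by
  rw [pvAxis_foldl_off]; simp

-- peeling one move off pvAxis when the current state is on-board
lemma pvAxis_cons (lo hi limit : Int) (mv : Bool × Int) (ms : List (Bool × Int))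
    (h : (decide (lo ≥ limit) || decide (hi < 0)) = false) :
    pvAxis lo hi limit (mv :: ms) =
      pvAxis (pvAxisStep limit (lo, hi, false) mv).1
             (pvAxisStep limit (lo, hi, false) mv).2.1 limit ms := by
  unfold pvAxis
  simp only [List.foldl_cons, h]
  rw [pvAxis_foldl_off limit ms _ _ ((pvAxisStep limit (lo, hi, false) mv).2.2),
      pvAxis_foldl_off limit ms _ _
        (decide ((pvAxisStep limit (lo, hi, false) mv).1 ≥ limit) ||
         decide ((pvAxisStep limit (lo, hi, false) mv).2.1 < 0))]
  have : (pvAxisStep limit (lo, hi, false) mv).2.2 =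
      (decide ((pvAxisStep limit (lo, hi, false) mv).1 ≥ limit) ||
       decide ((pvAxisStep limit (lo, hi, false) mv).2.1 < 0)) := by
    simp [pvAxisStep]
  rw [this]

-- if pvAxis is fed an off-board seed its flag is true
lemma pvAxis_off_seed (lo hi limit : Int) (ms : List (Bool × Int))
    (h : (decide (lo ≥ limit) || decide (hi < 0)) = true) :
    (pvAxis lo hi limit ms).2.2 = true := by
  unfold pvAxis; rw [h]; exact pvAxis_seed_true limit lo hi ms

-- main invariant: A's loop equals the combination of the two axis passes
lemma pvLoopA_eq (n m : Int) :
    ∀ (L : List (Int × Int)) (r1 r2 c1 c2 : Int),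
      pvLoopA n m L r1 r2 c1 c2 =
        (if (pvAxis c1 c2 m (pvHMoves L)).2.2 || (pvAxis r1 r2 n (pvVMoves L)).2.2
         then 0
         else ((pvAxis r1 r2 n (pvVMoves L)).2.1 - (pvAxis r1 r2 n (pvVMoves L)).1 + 1) *
              ((pvAxis c1 c2 m (pvHMoves L)).2.1 - (pvAxis c1 c2 m (pvHMoves L)).1 + 1)) := by
  intro L
  induction L with
  | nil =>
    intro r1 r2 c1 c2
    simp only [pvLoopA, pvHMoves, pvVMoves, List.filter_nil, List.map_nil, pvAxis,
      List.foldl_nil, pvCheck]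
    by_cases h1 : r1 ≥ n <;> by_cases h2 : c1 ≥ m <;> by_cases h3 : r2 < 0 <;>
      by_cases h4 : c2 < 0 <;> simp [h1, h2, h3, h4]
  | cons q rest ih =>
    intro r1 r2 c1 c2
    obtain ⟨dir, dist⟩ := q
    by_cases hc : pvCheck r1 r2 c1 c2 n m = true
    · -- A returns 0; one of the two axes has an off-board seed, so B returns 0
      have h0 : pvLoopA n m ((dir, dist) :: rest) r1 r2 c1 c2 = 0 := by
        simp [pvLoopA, hc]
      rw [h0]
      have : (pvAxis c1 c2 m (pvHMoves ((dir, dist) :: rest))).2.2 = true ∨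
             (pvAxis r1 r2 n (pvVMoves ((dir, dist) :: rest))).2.2 = true := by
        simp only [pvCheck, Bool.or_eq_true, decide_eq_true_eq] at hc
        rcases hc with ((h | h) | h) | h
        · exact Or.inr (pvAxis_off_seed _ _ _ _ (by simp [h]))
        · exact Or.inl (pvAxis_off_seed _ _ _ _ (by simp [h]))
        · exact Or.inr (pvAxis_off_seed _ _ _ _ (by simp [h]))
        · exact Or.inl (pvAxis_off_seed _ _ _ _ (by simp [h]))
      rcases this with h | h <;> simp [h]
    · -- on-board: peel one query on both sides and apply the IH
      have hc' : pvCheck r1 r2 c1 c2 n m = false := by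
        cases h : pvCheck r1 r2 c1 c2 n m
        · rfl
        · exact absurd h hc
      simp only [pvCheck, Bool.or_eq_false_iff, decide_eq_false_iff_not] at hc'
      obtain ⟨⟨⟨h1, h2⟩, h3⟩, h4⟩ := hc'
      have hcseed : (decide (c1 ≥ m) || decide (c2 < 0)) = false := by
        simp [h2, h4]
      have hrseed : (decide (r1 ≥ n) || decide (r2 < 0)) = false := by
        simp [h1, h3]
      by_cases hd0 : dir = 0
      · have hH : pvHMoves ((dir, dist) :: rest) = (true, dist) :: pvHMoves rest := by
          simp [pvHMoves, hd0]
        have hV : pvVMoves ((dir, dist) :: rest) = pvVMoves rest := by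
          simp [pvVMoves, hd0]
        have hA : pvLoopA n m ((dir, dist) :: rest) r1 r2 c1 c2 =
            pvLoopA n m rest r1 r2 (if c1 ≠ 0 then c1 + dist else c1)
              (min (c2 + dist) (m - 1)) := by
          simp [pvLoopA, pvCheck, h1, h2, h3, h4, hd0]
        rw [hA, hH, hV, ih, pvAxis_cons _ _ _ _ _ hcseed]
        simp [pvAxisStep]
      · by_cases hd1 : dir = 1
        · have hH : pvHMoves ((dir, dist) :: rest) = (false, dist) :: pvHMoves rest := by
            simp [pvHMoves, hd1]
          have hV : pvVMoves ((dir, dist) :: rest) = pvVMoves rest := by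
            simp [pvVMoves, hd1]
          have hA : pvLoopA n m ((dir, dist) :: rest) r1 r2 c1 c2 =
              pvLoopA n m rest r1 r2 (max 0 (c1 - dist))
                (if c2 ≠ m - 1 then c2 - dist else c2) := by
            simp [pvLoopA, pvCheck, h1, h2, h3, h4, hd1]
          rw [hA, hH, hV, ih, pvAxis_cons _ _ _ _ _ hcseed]
          simp [pvAxisStep]
        · have hH : pvHMoves ((dir, dist) :: rest) = pvHMoves rest := by
            simp [pvHMoves, hd0, hd1]
          by_cases hd2 : dir = 2
          · have hV : pvVMoves ((dir, dist) :: rest) = (true, dist) :: pvVMoves rest := by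
              simp [pvVMoves, hd2]
            have hA : pvLoopA n m ((dir, dist) :: rest) r1 r2 c1 c2 =
                pvLoopA n m rest (if r1 ≠ 0 then r1 + dist else r1)
                  (min (r2 + dist) (n - 1)) c1 c2 := by
              simp [pvLoopA, pvCheck, h1, h2, h3, h4, hd2]
            rw [hA, hH, hV, ih, pvAxis_cons _ _ _ _ _ hrseed]
            simp [pvAxisStep]
          · have hV : pvVMoves ((dir, dist) :: rest) = (false, dist) :: pvVMoves rest := by
              simp [pvVMoves, hd0, hd1, hd2]
            have hA : pvLoopA n m ((dir, dist) :: rest) r1 r2 c1 c2 =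
                pvLoopA n m rest (max 0 (r1 - dist))
                  (if r2 ≠ n - 1 then r2 - dist else r2) c1 c2 := by
              simp [pvLoopA, pvCheck, h1, h2, h3, h4, hd0, hd1, hd2]
            rw [hA, hH, hV, ih, pvAxis_cons _ _ _ _ _ hrseed]
            simp [pvAxisStep]

-- ===== VERDICT (by name: the statement is the Claim_ definition above) =====
theorem solution_spec : Claim_equal_solution := by
  intro n m x y queries _
  unfold Spec_solution solution solution_alt
  rw [pvLoopA_eq]
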